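-- pv_equiv track=rewrite | github.com/p208p2002/ZH-Punctuation-Restore | predict.py | merge_stride
-- ===== SOURCE A (Python) =====
-- def merge_stride(output:int,window_size:int,step:int):
--     out = []
--     for sent_idx,stride_sent in enumerate(output):
--         token_idx = step*sent_idx
--         for token_ner in stride_sent:
--             if token_idx + 1 > len(out):
--                 out.append(token_ner)
--             else:
--                 out[token_idx] = token_ner
--             token_idx += 1
--
--     return out
-- ===== SOURCE B (Python) =====
-- def merge_stride(output, window_size, step):
--     out = []
--     for sent_idx, stride_sent in enumerate(output):
--         token_idx = step * sent_idx
--         out[token_idx:token_idx + len(stride_sent)] = stride_sent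
--     return out
-- ===== Notes on version B (the rewrite author's own statement) =====
-- stated objective: simpler
-- what changed: The inner per-token loop with its append-or-overwrite branch is replaced by one bulk slice assignment out[token_idx:token_idx+len(stride_sent)] = stride_sent per sentence.
-- outside the precondition, e.g. on merge_stride([['a'], ['b']], 2, -1): A returns ['b'], B returns ['b', 'a']
import Mathlib
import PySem

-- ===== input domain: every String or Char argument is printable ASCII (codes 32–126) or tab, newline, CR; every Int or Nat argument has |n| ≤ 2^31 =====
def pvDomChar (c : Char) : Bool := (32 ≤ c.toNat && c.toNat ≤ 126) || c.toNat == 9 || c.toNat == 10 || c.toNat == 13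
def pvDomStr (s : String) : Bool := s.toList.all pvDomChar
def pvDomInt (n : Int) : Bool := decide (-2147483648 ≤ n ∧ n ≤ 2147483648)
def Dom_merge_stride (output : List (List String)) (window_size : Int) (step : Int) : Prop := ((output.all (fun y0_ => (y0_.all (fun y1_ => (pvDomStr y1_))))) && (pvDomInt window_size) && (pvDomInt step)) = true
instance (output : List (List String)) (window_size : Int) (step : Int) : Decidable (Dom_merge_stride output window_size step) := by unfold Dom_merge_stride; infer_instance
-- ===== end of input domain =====

-- B replaces A's per-token append-or-overwrite loop by one slice assignment per sentence (simpler decomposition, same cost).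

-- ===== PORT A =====
-- inner loop: 'for token_ner in stride_sent: if token_idx + 1 > len(out): out.append(...) else: out[token_idx] = ...; token_idx += 1'
-- out[token_idx] = x is PySem.List.pySetD (total form; exact under Pre_, which keeps token_idx in range wherever this branch is reached)
def pvInnerA : List String → List String → Int → List String × Int
  | [], out, t => (out, t)
  | x :: rest, out, t =>
    if t + 1 > (out.length : Int) then pvInnerA rest (out ++ [x]) (t + 1)
    else pvInnerA rest (PySem.List.pySetD out t x) (t + 1)

-- outer loop: 'for sent_idx, stride_sent in enumerate(output): token_idx = step*sent_idx; <inner>'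
def pvOuterA (step : Int) : List (Int × List String) → List String → List String
  | [], out => out
  | (i, sent) :: rest, out => pvOuterA step rest (pvInnerA sent out (step * i)).1

def merge_stride (output : List (List String)) (window_size : Int) (step : Int) : List String :=
  pvOuterA step (PySem.List.enumerate output) []

-- ===== PORT B =====
-- Python slice-endpoint resolution for a step-1 slice of a list of length n (exact: negative offsets from the end, then clamp to [0, n])
def pvSliceIdx (t : Int) (n : Nat) : Nat := (max 0 (min (n : Int) (if t < 0 then t + n else t))).toNat

-- Python slice assignment 'out[a:b] = vals' for step-1 slices (exact: replaces out[a':b'] by vals)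
def pvSliceAssign (out : List String) (a b : Int) (vals : List String) : List String :=
  out.take (pvSliceIdx a out.length) ++ vals ++
    out.drop (max (pvSliceIdx a out.length) (pvSliceIdx b out.length))

def merge_stride_alt (output : List (List String)) (window_size : Int) (step : Int) : List String :=
  (PySem.List.enumerate output).foldl
    (fun out p => pvSliceAssign out (step * p.1) (step * p.1 + p.2.length) p.2) []

-- ===== PRECONDITION & SPEC =====
-- Pre_ excludes negative step with more than one sentence: there A's running index goes negative and
-- either wraps around Python-style (an accident of list indexing, which B's slice assignment does not
-- reproduce) or raises IndexError; strides are non-negative for this function's purpose.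
def Pre_merge_stride (output : List (List String)) (window_size : Int) (step : Int) : Prop :=
  0 ≤ step ∨ output.length ≤ 1
instance (output : List (List String)) (window_size : Int) (step : Int) : Decidable (Pre_merge_stride output window_size step) := by unfold Pre_merge_stride; infer_instance

def pvWitness_merge_stride : List (List String) × Int × Int := ([["a", "b"], ["c", "d"]], 3, 1)

def Spec_merge_stride (output : List (List String)) (window_size : Int) (step : Int) (out : List String) : Prop := out = merge_stride_alt output window_size step
instance (output : List (List String)) (window_size : Int) (step : Int) (out : List String) : Decidable (Spec_merge_stride output window_size step out) := by unfold Spec_merge_stride; infer_instance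

-- ===== CLAIM (what is proved, stated in full; the proofs are below) =====
def Claim_equal_merge_stride : Prop := ∀ (output : List (List String)) (window_size : Int) (step : Int), Dom_merge_stride output window_size step → Pre_merge_stride output window_size step → Spec_merge_stride output window_size step (merge_stride output window_size step)

-- ===== LEMMAS AND PROOFS =====

-- Endpoint resolution at a nonnegative (Nat-cast) offset is a plain clamped index.
lemma pvSliceIdx_natCast (m n : Nat) : pvSliceIdx (m : Nat) n = min n m := by
  unfold pvSliceIdx
  have : ¬ ((m : Int) < 0) := by omega
  simp only [this, if_false]
  omega

-- Slice assignment at a nonnegative start is splicing: take, insert, drop.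
lemma pvSliceAssign_natCast (out vals : List String) (m : Nat) :
    pvSliceAssign out (m : Nat) ((m : Nat) + vals.length) vals =
      out.take m ++ vals ++ out.drop (m + vals.length) := by
  unfold pvSliceAssign
  have h1 : ((m : Int) + vals.length) = ((m + vals.length : Nat) : Int) := by push_cast; ring
  rw [h1, pvSliceIdx_natCast, pvSliceIdx_natCast]
  have hmax : max (min out.length m) (min out.length (m + vals.length)) =
      min out.length (m + vals.length) := by omega
  rw [hmax]
  congr 1
  · congr 1
    rcases le_or_gt m out.length with h | h
    · rw [Nat.min_eq_right h]
    · rw [Nat.min_eq_left (by omega), List.take_of_length_le (by omega),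
        List.take_of_length_le (by omega)]
  · rcases le_or_gt (m + vals.length) out.length with h | h
    · rw [Nat.min_eq_right h]
    · rw [Nat.min_eq_left (by omega), List.drop_of_length_le (by omega),
        List.drop_of_length_le (by omega)]

-- A's inner token loop, started at a nonnegative index m, computes exactly the splice.
lemma pvInnerA_eq (sent : List String) :
    ∀ (out : List String) (m : Nat),
      pvInnerA sent out (m : Nat) =
        (out.take m ++ sent ++ out.drop (m + sent.length), (m : Int) + sent.length) := by
  induction sent with
  | nil =>
    intro out m
    simp [pvInnerA, List.take_append_drop]
  | cons x rest ih =>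
    intro out m
    rcases le_or_gt out.length m with h | h
    · -- append branch: m ≥ len out
      have hc : (m : Int) + 1 > (out.length : Int) := by omega
      have hcast : (m : Int) + 1 = ((m + 1 : Nat) : Int) := by push_cast; ring
      rw [pvInnerA, if_pos hc, hcast, ih]
      have h1 : (out ++ [x]).take (m + 1) = out ++ [x] := by
        apply List.take_of_length_le; simp; omega
      have h2 : (out ++ [x]).drop (m + 1 + rest.length) = [] := by
        apply List.drop_eq_nil_of_le; simp; omega
      have h3 : out.take m = out := List.take_of_length_le h
      have h4 : out.drop (m + (rest.length + 1)) = [] := List.drop_eq_nil_of_le (by omega)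
      simp [h1, h2, h3, h4]
      omega
    · -- overwrite branch: m < len out
      have hc : ¬ ((m : Int) + 1 > (out.length : Int)) := by omega
      have hcast : (m : Int) + 1 = ((m + 1 : Nat) : Int) := by push_cast; ring
      rw [pvInnerA, if_neg hc, PySem.List.pySetD_natCast, hcast, ih]
      have hset : out.set m x = out.take m ++ x :: out.drop (m + 1) := by
        rw [List.set_eq_take_append_cons_drop, if_pos h]
      have hlt : (out.take m).length = m := by simp; omega
      simp only [Prod.mk.injEq]
      refine ⟨?_, by push_cast [List.length_cons]; ring⟩
      rw [hset]
      have h1 : (out.take m ++ x :: out.drop (m + 1)).take (m + 1) = out.take m ++ [x] := by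
        rw [List.take_append, hlt]
        simp
      have h2 : (out.take m ++ x :: out.drop (m + 1)).drop (m + 1 + rest.length) =
          out.drop (m + (rest.length + 1)) := by
        have hd : (out.take m).drop (m + 1 + rest.length) = [] :=
          List.drop_eq_nil_of_le (by rw [hlt]; omega)
        have he : m + 1 + rest.length - m = rest.length + 1 := by omega
        rw [List.drop_append, hd, hlt, he]
        simp only [List.drop_succ_cons, List.drop_drop, List.nil_append]
        congr 1; omega
      rw [h1, h2]
      simp

-- A's outer loop equals B's fold, provided every index used is nonnegative.
lemma pvOuterA_eq (step : Int) (l : List (Int × List String)) :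
    ∀ (out : List String), (∀ p ∈ l, 0 ≤ step * p.1) →
      pvOuterA step l out =
        l.foldl (fun out p => pvSliceAssign out (step * p.1) (step * p.1 + p.2.length) p.2) out := by
  induction l with
  | nil => intro out _; rfl
  | cons q rest ih =>
    intro out h
    obtain ⟨i, sent⟩ := q
    have hnn : 0 ≤ step * i := h (i, sent) (by simp)
    obtain ⟨m, hm⟩ : ∃ m : Nat, step * i = (m : Int) := ⟨(step * i).toNat, by omega⟩
    rw [pvOuterA, List.foldl_cons]
    simp only [hm]
    rw [pvInnerA_eq, pvSliceAssign_natCast]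
    exact ih _ (fun p hp => h p (by simp [hp]))

-- ===== VERDICT (by name: the statement is the Claim_ definition above) =====
theorem merge_stride_spec : Claim_equal_merge_stride := by
  intro output window_size step _ hpre
  unfold Spec_merge_stride merge_stride merge_stride_alt
  apply pvOuterA_eq
  intro p hp
  rw [PySem.List.mem_enumerate_iff] at hp
  obtain ⟨k, hk, rfl⟩ := hp
  rcases hpre with hs | h1
  · simp; positivity
  · have : k = 0 := by omega
    subst this
    simp
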